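-- pv_equiv track=rewrite | github.com/microsoft/webgym | analysis/visualize_results.py | count_tasks_with_duplicate_websites
-- ===== SOURCE A (Python) =====
-- def count_tasks_with_duplicate_websites(tasks_per_iteration):
--     """
--     For each iteration, count how many tasks share a website with another task.
--
--     Example: If iteration has task1(amazon), task2(amazon), task3(ebay),
--     then count = 2 (both amazon tasks share the same website).
--     """
--     counts = []
--     for tasks in tasks_per_iteration:
--         # Extract website from each task_id (format: subdomain_website_difficulty_task_name)
--         website_counts = {}
--         for task_id in tasks:
--             parts = task_id.split('_')
--             if len(parts) >= 2:
--                 website = parts[1]  # website is the second component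
--                 website_counts[website] = website_counts.get(website, 0) + 1
--
--         # Count tasks where the website appears more than once
--         duplicate_count = sum(count for count in website_counts.values() if count > 1)
--         counts.append(duplicate_count)
--
--     return counts
-- ===== SOURCE B (Python) =====
-- def count_tasks_with_duplicate_websites(tasks_per_iteration):
--     """Single-pass per iteration: running website counts with incremental duplicate total."""
--     def dup_count(tasks):
--         seen = {}
--         total = 0
--         for task_id in tasks:
--             parts = task_id.split('_')
--             if len(parts) >= 2:
--                 w = parts[1]
--                 c = seen.get(w, 0) + 1
--                 seen[w] = c
--                 total += 2 if c == 2 else (1 if c > 2 else 0)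
--         return total
--     return [dup_count(tasks) for tasks in tasks_per_iteration]
-- ===== Notes on version B (the rewrite author's own statement) =====
-- stated objective: alternative
-- what changed: B computes each iteration's duplicate count in a single pass, keeping a running website->count dict and incrementally adding 2 when a website reaches count 2 and 1 for each further repeat, eliminating A's second pass over website_counts.values(); the outer loop becomes a list comprehension over a helper.
import Mathlib
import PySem

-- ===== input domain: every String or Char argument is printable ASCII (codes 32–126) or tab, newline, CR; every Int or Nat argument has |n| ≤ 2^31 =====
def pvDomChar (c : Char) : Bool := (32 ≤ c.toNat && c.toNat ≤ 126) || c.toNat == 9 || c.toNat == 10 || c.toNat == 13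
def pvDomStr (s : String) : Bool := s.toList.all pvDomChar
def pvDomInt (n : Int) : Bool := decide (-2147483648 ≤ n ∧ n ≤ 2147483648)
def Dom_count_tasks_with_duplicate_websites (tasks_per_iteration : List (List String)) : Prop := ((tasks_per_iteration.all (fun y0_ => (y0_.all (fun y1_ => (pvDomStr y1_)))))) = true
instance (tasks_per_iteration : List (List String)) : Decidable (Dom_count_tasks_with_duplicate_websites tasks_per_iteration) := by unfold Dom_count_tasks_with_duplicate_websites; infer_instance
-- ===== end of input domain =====

-- B replaces A's two passes per iteration (build website_counts, then sum values > 1) by a single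
-- pass keeping a running count dict and an incrementally updated total; same O(n) cost (objective: alternative).

-- ===== PORT A =====
def count_tasks_with_duplicate_websites (tasks_per_iteration : List (List String)) : List Int :=
  tasks_per_iteration.foldl (fun counts tasks =>
    let website_counts : PySem.Dict String Int :=
      tasks.foldl (fun d task_id =>
        let parts := (PySem.Str.split? task_id "_").getD []   -- "_" ≠ "": split? is always some
        if 2 ≤ parts.length then
          let website := (PySem.List.pyGet? parts 1).getD ""  -- in range: parts.length ≥ 2
          d.insert website (d.getD website 0 + 1)
        else d) PySem.Dict.empty
    let duplicate_count := (website_counts.values.filter (fun c => decide (1 < c))).sum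
    counts ++ [duplicate_count]) []

-- ===== PORT B =====
def pvDupCount (tasks : List String) : Int :=
  (tasks.foldl (fun (st : PySem.Dict String Int × Int) task_id =>
      let parts := (PySem.Str.split? task_id "_").getD []     -- "_" ≠ "": split? is always some
      if 2 ≤ parts.length then
        let w := (PySem.List.pyGet? parts 1).getD ""          -- in range: parts.length ≥ 2
        let c := st.1.getD w 0 + 1
        (st.1.insert w c, st.2 + (if c = 2 then 2 else if 2 < c then 1 else 0))
      else st) (PySem.Dict.empty, 0)).2

def count_tasks_with_duplicate_websites_alt (tasks_per_iteration : List (List String)) : List Int :=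
  tasks_per_iteration.map pvDupCount

-- ===== PRECONDITION & SPEC =====
def Spec_count_tasks_with_duplicate_websites (tasks_per_iteration : List (List String)) (out : List Int) : Prop := out = count_tasks_with_duplicate_websites_alt tasks_per_iteration
instance (tasks_per_iteration : List (List String)) (out : List Int) : Decidable (Spec_count_tasks_with_duplicate_websites tasks_per_iteration out) := by unfold Spec_count_tasks_with_duplicate_websites; infer_instance

-- ===== CLAIM (what is proved, stated in full; the proofs are below) =====
def Claim_equal_count_tasks_with_duplicate_websites : Prop := ∀ (tasks_per_iteration : List (List String)), Dom_count_tasks_with_duplicate_websites tasks_per_iteration → Spec_count_tasks_with_duplicate_websites tasks_per_iteration (count_tasks_with_duplicate_websites tasks_per_iteration)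

-- ===== LEMMAS AND PROOFS =====

-- the list of websites an iteration's tasks contribute (both loops act through this list)
def pvWebs (tasks : List String) : List String :=
  tasks.filterMap (fun t =>
    let parts := (PySem.Str.split? t "_").getD []
    if 2 ≤ parts.length then some ((PySem.List.pyGet? parts 1).getD "") else none)

def pvF (c : Int) : Int := if 1 < c then c else 0          -- A's contribution of a final count
def pvG (c : Int) : Int := if c = 2 then 2 else if 2 < c then 1 else 0   -- B's increment at running count c

def pvPhi (ws : List String) : Int :=
  ((PySem.Set.ofList ws).map (fun k => pvF ((ws.count k : Int)))).sum

def pvAIter (tasks : List String) : Int :=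
  ((tasks.foldl (fun d task_id =>
      let parts := (PySem.Str.split? task_id "_").getD []
      if 2 ≤ parts.length then
        let website := (PySem.List.pyGet? parts 1).getD ""
        d.insert website (d.getD website 0 + 1)
      else d) PySem.Dict.empty).values.filter (fun c => decide (1 < c))).sum

lemma pvA_fold_webs (tasks : List String) (d : PySem.Dict String Int) :
    tasks.foldl (fun d task_id =>
        let parts := (PySem.Str.split? task_id "_").getD []
        if 2 ≤ parts.length then
          let website := (PySem.List.pyGet? parts 1).getD ""
          d.insert website (d.getD website 0 + 1)
        else d) d
      = (pvWebs tasks).foldl (fun d w => d.insert w (d.getD w 0 + 1)) d := by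
  induction tasks generalizing d with
  | nil => rfl
  | cons t r ih =>
    simp only [List.foldl_cons, pvWebs, List.filterMap_cons]
    by_cases h : 2 ≤ ((PySem.Str.split? t "_").getD []).length
    · simp only [h, if_pos, List.foldl_cons]
      exact ih _
    · simp only [h, if_false]
      exact ih _

lemma pvB_fold_webs (tasks : List String) (st : PySem.Dict String Int × Int) :
    tasks.foldl (fun (st : PySem.Dict String Int × Int) task_id =>
        let parts := (PySem.Str.split? task_id "_").getD []
        if 2 ≤ parts.length then
          let w := (PySem.List.pyGet? parts 1).getD ""
          let c := st.1.getD w 0 + 1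
          (st.1.insert w c, st.2 + (if c = 2 then 2 else if 2 < c then 1 else 0))
        else st) st
      = (pvWebs tasks).foldl (fun st w =>
          let c := st.1.getD w 0 + 1
          (st.1.insert w c, st.2 + pvG c)) st := by
  induction tasks generalizing st with
  | nil => rfl
  | cons t r ih =>
    simp only [List.foldl_cons, pvWebs, List.filterMap_cons]
    by_cases h : 2 ≤ ((PySem.Str.split? t "_").getD []).length
    · simp only [h, if_pos, List.foldl_cons]
      exact ih _
    · simp only [h, if_false]
      exact ih _

lemma pvB_fold_fst (ws : List String) (d : PySem.Dict String Int) (t : Int) :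
    (ws.foldl (fun st w =>
        let c := st.1.getD w 0 + 1
        (st.1.insert w c, st.2 + pvG c)) (d, t)).1
      = ws.foldl (fun d w => d.insert w (d.getD w 0 + 1)) d := by
  induction ws generalizing d t with
  | nil => rfl
  | cons w r ih => simpa using ih _ _

lemma pv_sum_filter (l : List Int) :
    (l.filter (fun c => decide (1 < c))).sum = (l.map pvF).sum := by
  induction l with
  | nil => rfl
  | cons c r ih =>
    by_cases h : 1 < c
    · simp [pvF, h, ih]
    · simp [pvF, h, ih]

lemma pv_sum_map_except {α : Type} [DecidableEq α] (L : List α) (x : α) (F F' : α → Int)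
    (hnd : L.Nodup) (hx : x ∈ L) (h : ∀ y ∈ L, y ≠ x → F' y = F y) :
    (L.map F').sum = (L.map F).sum + (F' x - F x) := by
  induction L with
  | nil => cases hx
  | cons a r ih =>
    rcases List.mem_cons.mp hx with rfl | hxr
    · have hrest : ∀ y ∈ r, F' y = F y := fun y hy =>
        h y (List.mem_cons_of_mem _ hy) (fun hyx => (List.nodup_cons.mp hnd).1 (hyx ▸ hy))
      simp only [List.map_cons, List.sum_cons, List.map_congr_left hrest]
      ring
    · have hax : a ≠ x := fun hax => (List.nodup_cons.mp hnd).1 (hax ▸ hxr)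
      have := ih (List.nodup_cons.mp hnd).2 hxr (fun y hy => h y (List.mem_cons_of_mem _ hy))
      simp only [List.map_cons, List.sum_cons, this, h a (List.mem_cons_self) hax]
      ring

lemma pvFG (c : Int) (hc : 1 ≤ c) : pvF (c + 1) - pvF c = pvG (c + 1) := by
  unfold pvF pvG; split_ifs <;> omega

lemma pvPhi_append (ws : List String) (x : String) :
    pvPhi (ws ++ [x]) = pvPhi ws + pvG ((ws.count x : Int) + 1) := by
  unfold pvPhi
  rw [PySem.Set.ofList_append_singleton]
  by_cases hx : x ∈ ws
  · have hmem : x ∈ PySem.Set.ofList ws := (PySem.Set.mem_ofList ws x).mpr hx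
    rw [PySem.Set.add_of_mem hmem]
    have h1 : ∀ y ∈ PySem.Set.ofList ws, y ≠ x →
        pvF (((ws ++ [x]).count y : Int)) = pvF ((ws.count y : Int)) := by
      intro y _ hyx
      rw [List.count_append]
      simp [Ne.symm hyx]
    rw [pv_sum_map_except _ x _ _ (PySem.Set.nodup_ofList ws) hmem h1]
    have hcx : (ws ++ [x]).count x = ws.count x + 1 := by
      rw [List.count_append]; simp
    rw [hcx]
    have hc1 : (1 : Int) ≤ (ws.count x : Int) := by
      exact_mod_cast List.one_le_count_iff.mpr hx
    push_cast
    rw [pvFG _ hc1]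
  · have hmem : x ∉ PySem.Set.ofList ws := fun h => hx ((PySem.Set.mem_ofList ws x).mp h)
    rw [PySem.Set.add_of_not_mem hmem]
    have h1 : ∀ y ∈ PySem.Set.ofList ws,
        pvF (((ws ++ [x]).count y : Int)) = pvF ((ws.count y : Int)) := by
      intro y hy
      have hyx : y ≠ x := fun hyx => hx (hyx ▸ (PySem.Set.mem_ofList ws y).mp hy)
      rw [List.count_append]
      simp [Ne.symm hyx]
    have hcx : (ws ++ [x]).count x = ws.count x + 1 := by rw [List.count_append]; simp
    have hcx0 : ws.count x = 0 := List.count_eq_zero.mpr hx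
    simp only [List.map_append, List.sum_append, List.map_congr_left h1, List.map_cons,
      List.map_nil, List.sum_cons, List.sum_nil, hcx, hcx0]
    simp [pvF, pvG]

lemma pvA_val (ws : List String) :
    ((ws.foldl (fun d w => d.insert w (d.getD w 0 + 1)) PySem.Dict.empty).values.filter
        (fun c => decide (1 < c))).sum = pvPhi ws := by
  rw [PySem.Dict.foldl_insert_getD_add_one_eq_counter]
  have hv : (PySem.Dict.counter ws).values
      = (PySem.Set.ofList ws).map (fun k => ((ws.count k : Int))) := by
    show ((PySem.Dict.counter ws).items.map (·.2)) = _
    rw [PySem.Dict.items_counter]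
    simp [List.map_map, Function.comp]
  rw [hv, pv_sum_filter, List.map_map]
  rfl

lemma pvB_val (ws : List String) :
    (ws.foldl (fun st w =>
        let c := st.1.getD w 0 + 1
        (st.1.insert w c, st.2 + pvG c)) ((PySem.Dict.empty : PySem.Dict String Int), 0)).2
      = pvPhi ws := by
  induction ws using List.reverseRecOn with
  | nil => rfl
  | append_singleton r x ih =>
    rw [List.foldl_append, List.foldl_cons, List.foldl_nil]
    simp only []
    rw [pvPhi_append]
    have hfst := pvB_fold_fst r PySem.Dict.empty 0
    have hg : ((r.foldl (fun st w =>
        let c := st.1.getD w 0 + 1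
        (st.1.insert w c, st.2 + pvG c)) ((PySem.Dict.empty : PySem.Dict String Int), 0)).1).getD x 0
        = (r.count x : Int) := by
      rw [hfst, PySem.Dict.getD_foldl_insert_add_one]
      simp
    rw [hg, ih]

lemma pvAIter_eq_dup (tasks : List String) : pvAIter tasks = pvDupCount tasks := by
  unfold pvAIter pvDupCount
  rw [pvA_fold_webs, pvA_val, pvB_fold_webs, pvB_val]

-- ===== VERDICT (by name: the statement is the Claim_ definition above) =====
theorem count_tasks_with_duplicate_websites_spec : Claim_equal_count_tasks_with_duplicate_websites := by
  intro tpi _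
  show List.foldl (fun counts tasks => counts ++ [pvAIter tasks]) [] tpi = List.map pvDupCount tpi
  rw [PySem.List.foldl_append_singleton_eq_map (f := pvAIter)]
  simp only [List.nil_append]
  exact List.map_congr_left fun tasks _ => pvAIter_eq_dup tasks
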